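-- pv_equiv track=rewrite | github.com/wfais/zestaw-5-grupa-3-KamilKazanowskiUJ | ZADANIE2/maximize_it.py | maximize_expression
-- ===== SOURCE A (Python) =====
-- from itertools import product
--
-- def flatten_tuple(nested_tuple):
--     result = []
--     for item in nested_tuple:
--         if isinstance(item, tuple):
--             result.extend(flatten_tuple(item))
--         else:
--             result.append(item)
--     return result
--
-- def hyperproduct(lists):
--     if len(lists) == 1:
--         c = []
--         for num in lists[0]:
--             c.append((num, 0))
--         return c
--
--     a = lists[0]
--     for i in range(1, len(lists)):
--         a = list(product(a, lists[i]))
--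
--     b = []
--     for item in a:
--         b.append(tuple(flatten_tuple(item)))
--     return b
--
-- def S_function(iterable, M):
--     sum = 0
--     for item in iterable:
--         sum += item**2
--
--     return sum % M
--
-- def maximize_expression(K, M, lists):
--     products = hyperproduct(lists)
--     max_expr = 0
--     for item in products:
--         n = S_function(item, M)
--         if n > max_expr:
--             max_expr = n
--
--     return max_expr
-- ===== SOURCE B (Python) =====
-- def maximize_expression(K, M, lists):
--     # DP over achievable residues mod M: one pass over the lists,
--     # keeping only the set of reachable partial sums of squares mod M.
--     reach = {0}
--     for lst in lists:
--         reach = {(r + x * x) % M for r in reach for x in lst}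
--     return max(reach | {0})
-- ===== Notes on version B (the rewrite author's own statement) =====
-- stated objective: faster
-- what changed: Replaces the explicit Cartesian product of all lists (materialising every tuple, then summing squares per tuple) by a one-pass DP that only keeps the set of reachable partial sums of squares modulo M.
-- outside the precondition, e.g. on maximize_expression(0, 0, [[1], []]): A returns 0, B raises ZeroDivisionError
import Mathlib
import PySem

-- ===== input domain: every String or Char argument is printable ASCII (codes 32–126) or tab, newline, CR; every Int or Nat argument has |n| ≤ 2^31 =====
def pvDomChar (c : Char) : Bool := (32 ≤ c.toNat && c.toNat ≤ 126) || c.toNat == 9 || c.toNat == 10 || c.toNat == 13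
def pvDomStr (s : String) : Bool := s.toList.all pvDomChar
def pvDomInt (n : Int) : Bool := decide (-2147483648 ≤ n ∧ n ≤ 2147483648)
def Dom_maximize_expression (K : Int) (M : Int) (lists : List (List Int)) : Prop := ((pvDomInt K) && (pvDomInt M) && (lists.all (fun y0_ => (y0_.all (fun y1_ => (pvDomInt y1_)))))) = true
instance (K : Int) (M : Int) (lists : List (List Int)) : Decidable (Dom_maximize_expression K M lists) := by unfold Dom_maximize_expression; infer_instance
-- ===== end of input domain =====

-- B replaces A's materialised Cartesian product by a one-pass DP over the set of
-- reachable partial sums of squares mod M (asymptotically faster on many lists).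


-- ===== PORT A =====
-- Python's nested tuples ((x0,x1),x2)… are modeled by this binary-pair type.
inductive PyTup where
  | int : Int → PyTup
  | pair : PyTup → PyTup → PyTup
deriving DecidableEq, Repr

-- flatten_tuple: iterating a tuple's two members, recursing on tuples, appending ints.
def flatten_tuple : PyTup → List Int
  | .int n => [n]
  | .pair a b => flatten_tuple a ++ flatten_tuple b

-- hyperproduct: the (num, 0) pairs of the single-list branch become [num, 0].
-- lists[0] (raises on []) is headD [] here; Pre_ excludes the empty list of lists.
-- lists[i] for i in range(1, len(lists)) is always in range, so pyGetD _ _ [] is exact.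
def hyperproduct (lists : List (List Int)) : List (List Int) :=
  if PySem.List.len lists == 1 then
    (lists.headD []).foldl (fun c num => c ++ [[num, 0]]) []
  else
    let a0 : List PyTup := (lists.headD []).map PyTup.int
    let a := (PySem.List.pyRange 1 (PySem.List.len lists)).foldl
      (fun a i => (List.product a (PySem.List.pyGetD lists i [])).map
        (fun p => PyTup.pair p.1 (PyTup.int p.2))) a0
    a.foldl (fun b item => b ++ [flatten_tuple item]) []

def S_function (iterable : List Int) (M : Int) : Int :=
  PySem.Int.mod (iterable.foldl (fun s item => s + item ^ 2) 0) M

def maximize_expression (K : Int) (M : Int) (lists : List (List Int)) : Int :=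
  let products := hyperproduct lists
  products.foldl (fun mx item => let n := S_function item M; if n > mx then n else mx) 0

-- ===== PORT B =====
-- the set comprehension {(r + x*x) % M for r in reach for x in lst}
def altStep (M : Int) (reach : PySem.Set Int) (lst : List Int) : PySem.Set Int :=
  PySem.Set.ofList (reach.flatMap (fun r => lst.map (fun x => PySem.Int.mod (r + x * x) M)))

-- max(reach | {0}): the union contains 0 so Python's max never raises; getD 0 is unreachable.
def maximize_expression_alt (K : Int) (M : Int) (lists : List (List Int)) : Int :=
  let reach := lists.foldl (altStep M) (PySem.Set.ofList [0])
  match PySem.List.max? (PySem.Set.union reach [0]) (fun y => y) with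
  | some m => m
  | none => 0

-- ===== PRECONDITION & SPEC =====
-- Pre_ excludes lists = [] (A raises IndexError on lists[0]) and M = 0 (both programs
-- raise ZeroDivisionError whenever a residue is computed; A's return of 0 for M = 0 with
-- an empty member list only happens because the empty product skips the modulo there).
def Pre_maximize_expression (K : Int) (M : Int) (lists : List (List Int)) : Prop :=
  lists ≠ [] ∧ M ≠ 0
instance (K : Int) (M : Int) (lists : List (List Int)) : Decidable (Pre_maximize_expression K M lists) := by unfold Pre_maximize_expression; infer_instance

def pvWitness_maximize_expression : Int × Int × List (List Int) := (1, 7, [[1, 2], [3]])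

def Spec_maximize_expression (K : Int) (M : Int) (lists : List (List Int)) (out : Int) : Prop := out = maximize_expression_alt K M lists
instance (K : Int) (M : Int) (lists : List (List Int)) (out : Int) : Decidable (Spec_maximize_expression K M lists out) := by unfold Spec_maximize_expression; infer_instance

-- ===== CLAIM (what is proved, stated in full; the proofs are below) =====
def Claim_equal_maximize_expression : Prop := ∀ (K : Int) (M : Int) (lists : List (List Int)), Dom_maximize_expression K M lists → Pre_maximize_expression K M lists → Spec_maximize_expression K M lists (maximize_expression K M lists)
-- ===== LEMMAS AND PROOFS =====

-- squares-sum of a selection, and the snoc-style cartesian extension both ports reduce to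
def sqSum (c : List Int) : Int := (c.map (fun x => x * x)).sum
def extSel (cs : List (List Int)) (l : List Int) : List (List Int) :=
  cs.flatMap (fun c => l.map (fun n => c ++ [n]))

lemma int_eq_zero_of_dvd_of_abs_lt (n m : Int) (h : n ∣ m) (h2 : |m| < |n|) : m = 0 := by
  by_contra hm
  have := Int.le_of_dvd (abs_pos.mpr hm) ((abs_dvd _ _).mpr ((dvd_abs _ _).mpr h))
  omega

lemma pymod_bounds_abs (M a b : Int) (hM : M ≠ 0) :
    |PySem.Int.mod a M - PySem.Int.mod b M| < |M| := by
  rcases lt_or_gt_of_ne hM with h | h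
  · have b1 := PySem.Int.mod_neg_bounds a h
    have b2 := PySem.Int.mod_neg_bounds b h
    rcases abs_cases (PySem.Int.mod a M - PySem.Int.mod b M) with ⟨e1, _⟩ | ⟨e1, _⟩ <;>
      rcases abs_cases M with ⟨e2, _⟩ | ⟨e2, _⟩ <;> omega
  · have b1 := PySem.Int.mod_nonneg a h
    have b2 := PySem.Int.mod_lt a h
    have b3 := PySem.Int.mod_nonneg b h
    have b4 := PySem.Int.mod_lt b h
    rcases abs_cases (PySem.Int.mod a M - PySem.Int.mod b M) with ⟨e1, _⟩ | ⟨e1, _⟩ <;>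
      rcases abs_cases M with ⟨e2, _⟩ | ⟨e2, _⟩ <;> omega

lemma pymod_congr (M x y : Int) (hM : M ≠ 0) (hd : M ∣ x - y) :
    PySem.Int.mod x M = PySem.Int.mod y M := by
  have hx := PySem.Int.floordiv_mul_add_mod x M
  have hy := PySem.Int.floordiv_mul_add_mod y M
  have hdiv : M ∣ PySem.Int.mod x M - PySem.Int.mod y M := by
    have heq : PySem.Int.mod x M - PySem.Int.mod y M
        = (x - y) - (PySem.Int.floordiv x M * M - PySem.Int.floordiv y M * M) := by omega
    rw [heq]
    exact dvd_sub hd (dvd_sub (dvd_mul_left M _) (dvd_mul_left M _))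
  have hz := int_eq_zero_of_dvd_of_abs_lt M _ hdiv (pymod_bounds_abs M x y hM)
  omega

lemma pymod_zero (M : Int) (hM : M ≠ 0) : PySem.Int.mod 0 M = 0 := by
  have h := PySem.Int.floordiv_mul_add_mod 0 M
  have hd : M ∣ PySem.Int.mod 0 M - 0 := by
    have heq : PySem.Int.mod 0 M - 0 = 0 - PySem.Int.floordiv 0 M * M := by omega
    rw [heq]
    exact dvd_sub (dvd_zero M) (dvd_mul_left M _)
  have habs : |PySem.Int.mod 0 M - 0| < |M| := by
    rcases lt_or_gt_of_ne hM with hlt | hlt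
    · have b := PySem.Int.mod_neg_bounds 0 hlt
      rcases abs_cases (PySem.Int.mod 0 M - 0) with ⟨e1, _⟩ | ⟨e1, _⟩ <;>
        rcases abs_cases M with ⟨e2, _⟩ | ⟨e2, _⟩ <;> omega
    · have b1 := PySem.Int.mod_nonneg 0 hlt
      have b2 := PySem.Int.mod_lt 0 hlt
      rcases abs_cases (PySem.Int.mod 0 M - 0) with ⟨e1, _⟩ | ⟨e1, _⟩ <;>
        rcases abs_cases M with ⟨e2, _⟩ | ⟨e2, _⟩ <;> omega
  have hz := int_eq_zero_of_dvd_of_abs_lt M _ hd habs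
  omega

lemma pymod_add_sq (M a x : Int) (hM : M ≠ 0) :
    PySem.Int.mod (PySem.Int.mod a M + x * x) M = PySem.Int.mod (a + x * x) M := by
  apply pymod_congr _ _ _ hM
  have h := PySem.Int.floordiv_mul_add_mod a M
  have : PySem.Int.mod a M + x * x - (a + x * x) = -(PySem.Int.floordiv a M * M) := by omega
  rw [this]; exact (dvd_mul_left M _).neg_right

def stepT (a : List PyTup) (l : List Int) : List PyTup :=
  (List.product a l).map (fun p => PyTup.pair p.1 (PyTup.int p.2))

lemma sqSum_append (c : List Int) (x : Int) : sqSum (c ++ [x]) = sqSum c + x * x := by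
  simp [sqSum]

lemma mem_altStep (M : Int) (R : PySem.Set Int) (l : List Int) (y : Int) :
    y ∈ altStep M R l ↔ ∃ r ∈ R, ∃ x ∈ l, y = PySem.Int.mod (r + x * x) M := by
  simp [altStep, PySem.Set.mem_ofList, List.mem_flatMap, List.mem_map, eq_comm]

lemma mem_extSel (C : List (List Int)) (l : List Int) (c' : List Int) :
    c' ∈ extSel C l ↔ ∃ c ∈ C, ∃ x ∈ l, c' = c ++ [x] := by
  simp [extSel, eq_comm]

-- B's reach-set fold tracks exactly the residues of the selections of the ext-fold.
lemma reach_invariant (M : Int) (hM : M ≠ 0) :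
    ∀ (ls : List (List Int)) (R : PySem.Set Int) (C : List (List Int)),
      (∀ y, y ∈ R ↔ ∃ c ∈ C, y = PySem.Int.mod (sqSum c) M) →
      ∀ y, y ∈ ls.foldl (altStep M) R ↔ ∃ c ∈ ls.foldl extSel C, y = PySem.Int.mod (sqSum c) M := by
  intro ls
  induction ls with
  | nil => intro R C inv y; simpa using inv y
  | cons l ls ih =>
    intro R C inv y
    simp only [List.foldl_cons]
    refine ih (altStep M R l) (extSel C l) ?_ y
    intro z
    rw [mem_altStep]
    constructor
    · rintro ⟨r, hr, x, hx, rfl⟩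
      rcases (inv r).mp hr with ⟨c, hc, rfl⟩
      refine ⟨c ++ [x], (mem_extSel C l _).mpr ⟨c, hc, x, hx, rfl⟩, ?_⟩
      rw [sqSum_append, pymod_add_sq M _ x hM]
    · rintro ⟨c', hc', rfl⟩
      rcases (mem_extSel C l c').mp hc' with ⟨c, hc, x, hx, rfl⟩
      refine ⟨PySem.Int.mod (sqSum c) M, (inv _).mpr ⟨c, hc, rfl⟩, x, hx, ?_⟩
      rw [sqSum_append, pymod_add_sq M _ x hM]

-- A's max loop is a fold of max over the mapped residues
lemma foldA_eq_foldmax (M : Int) (ps : List (List Int)) (acc : Int) :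
    ps.foldl (fun mx item => let n := S_function item M; if n > mx then n else mx) acc
      = (ps.map (fun l => S_function l M)).foldl max acc := by
  induction ps generalizing acc with
  | nil => rfl
  | cons h t ih => simp only [List.foldl, List.map]; rw [ih]; congr 1; omega

lemma Sfun_eq (p : List Int) (M : Int) : S_function p M = PySem.Int.mod (sqSum p) M := by
  simp [S_function, PySem.List.foldl_add, sqSum, pow_two]

lemma map_flatten_fold (rest : List (List Int)) : ∀ (A : List PyTup),
    (rest.foldl stepT A).map flatten_tuple = rest.foldl extSel (A.map flatten_tuple) := by
  induction rest with
  | nil => intro A; rfl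
  | cons l t ih =>
    intro A
    simp only [List.foldl_cons, ih]
    congr 1
    simp [stepT, extSel, List.product, List.map_flatMap, List.flatMap_map,
      Function.comp_def, flatten_tuple]

lemma hyper_one (l0 : List Int) : hyperproduct [l0] = l0.map (fun n => [n, 0]) := by
  rw [hyperproduct]
  simp only [PySem.List.len, List.length_cons, List.length_nil, Nat.cast_one, Nat.zero_add,
    beq_self_eq_true, if_true, List.headD]
  rw [PySem.List.foldl_append_singleton_eq_map]
  simp

lemma hyper_else (l0 r1 : List Int) (rest : List (List Int)) :
    hyperproduct (l0 :: r1 :: rest) = (l0 :: r1 :: rest).foldl extSel [[]] := by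
  have hlen : (PySem.List.len (l0 :: r1 :: rest) == 1) = false := by
    simp [PySem.List.len]; omega
  rw [hyperproduct, hlen]
  simp only [Bool.false_eq_true, if_false]
  rw [PySem.List.foldl_append_singleton_eq_map]
  show [] ++ List.map flatten_tuple
      (List.foldl (fun acc j => stepT acc (PySem.List.pyGetD (l0 :: r1 :: rest) j []))
        (List.map PyTup.int ((l0 :: r1 :: rest).headD []))
        (PySem.List.pyRange 1 (PySem.List.len (l0 :: r1 :: rest)))) = _
  rw [PySem.List.foldl_pyRange_pyGetD (l0 :: r1 :: rest) [] stepT _ (by norm_num : (0:Int) ≤ 1)]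
  simp only [List.nil_append, Int.toNat_one, List.drop_succ_cons, List.drop_zero, List.headD]
  rw [map_flatten_fold]
  simp only [List.foldl_cons]
  congr 1
  simp [Function.comp_def, flatten_tuple, extSel]

-- the elements of A's products are (as residue sources) those of the ext-fold
lemma products_elems (M : Int) (l0 : List Int) (rest : List (List Int)) :
    ∀ y, (∃ p ∈ hyperproduct (l0 :: rest), y = S_function p M) ↔
      ∃ c ∈ (l0 :: rest).foldl extSel [[]], y = PySem.Int.mod (sqSum c) M := by
  intro y
  cases rest with
  | nil =>
    rw [hyper_one]
    simp [Sfun_eq, sqSum, extSel]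
  | cons r1 rest =>
    rw [hyper_else]
    simp only [Sfun_eq]

theorem main_equiv (K M : Int) (lists : List (List Int)) (hne : lists ≠ []) (hM : M ≠ 0) :
    maximize_expression K M lists = maximize_expression_alt K M lists := by
  obtain ⟨l0, rest, rfl⟩ : ∃ l0 rest, lists = l0 :: rest := by
    cases lists with
    | nil => exact absurd rfl hne
    | cons a b => exact ⟨a, b, rfl⟩
  -- A's value
  have hA : maximize_expression K M (l0 :: rest)
      = ((hyperproduct (l0 :: rest)).map (fun p => S_function p M)).foldl max 0 := by
    show (hyperproduct (l0 :: rest)).foldl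
      (fun mx item => let n := S_function item M; if n > mx then n else mx) 0 = _
    rw [foldA_eq_foldmax]
  set xs := (hyperproduct (l0 :: rest)).map (fun p => S_function p M) with hxs
  have hmaxA := PySem.List.max?_id_cons (0 : Int) xs
  have hAmem : xs.foldl max 0 ∈ (0 :: xs) := PySem.List.max?_mem hmaxA
  have hAmax : ∀ y ∈ (0 :: xs), y ≤ xs.foldl max 0 := by
    have h := PySem.List.max?_isMax hmaxA
    simpa using h
  -- B's value
  set reach := (l0 :: rest).foldl (altStep M) (PySem.Set.ofList [0]) with hreachdef
  set u := PySem.Set.union reach [0] with hu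
  have hbase : ∀ y, y ∈ PySem.Set.ofList [(0 : Int)] ↔
      ∃ c ∈ [([] : List Int)], y = PySem.Int.mod (sqSum c) M := by
    intro y
    simp [PySem.Set.mem_ofList, sqSum, pymod_zero M hM]
  have hreach := reach_invariant M hM (l0 :: rest) (PySem.Set.ofList [0]) [[]] hbase
  have hmemu : ∀ y, y ∈ u ↔ y ∈ reach ∨ y = 0 := by
    intro y; rw [hu]; simp [pysem]
  -- the two element collections coincide
  have hsame : ∀ y, y ∈ (0 :: xs) ↔ y ∈ u := by
    intro y
    rw [hmemu, List.mem_cons, hxs]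
    constructor
    · rintro (rfl | hy)
      · exact Or.inr rfl
      · rcases List.mem_map.mp hy with ⟨p, hp, rfl⟩
        exact Or.inl ((hreach _).mpr ((products_elems M l0 rest _).mp ⟨p, hp, rfl⟩))
    · rintro (hy | rfl)
      · rcases (products_elems M l0 rest y).mpr ((hreach y).mp hy) with ⟨p, hp, rfl⟩
        exact Or.inr (List.mem_map.mpr ⟨p, hp, rfl⟩)
      · exact Or.inl rfl
  have h0u : (0 : Int) ∈ u := (hsame 0).mp (List.mem_cons_self)
  obtain ⟨m, hm⟩ : ∃ m, PySem.List.max? u (fun y => y) = some m := by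
    cases h : PySem.List.max? u (fun y => y) with
    | none =>
      have : u = [] := (PySem.List.max?_eq_none_iff u _).mp h
      rw [this] at h0u
      exact absurd h0u (List.not_mem_nil)
    | some m => exact ⟨m, rfl⟩
  have hB : maximize_expression_alt K M (l0 :: rest) = m := by
    show (match PySem.List.max? u (fun y => y) with
          | some m => m
          | none => 0) = m
    rw [hm]
  have hmmem : m ∈ (0 :: xs) := (hsame m).mpr (PySem.List.max?_mem hm)
  have hmmax : ∀ y ∈ u, y ≤ m := by
    have h := PySem.List.max?_isMax hm
    simpa using h
  rw [hA, hB]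
  exact le_antisymm (hmmax _ ((hsame _).mp hAmem)) (hAmax _ hmmem)

-- ===== VERDICT (by name: the statement is the Claim_ definition above) =====
theorem maximize_expression_spec : Claim_equal_maximize_expression := by
  intro K M lists _ hpre
  unfold Spec_maximize_expression
  exact main_equiv K M lists hpre.1 hpre.2
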